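-- pv_equiv track=rewrite | github.com/v3rbalgit/coinwatch | coinwatch/shared/clients/coingecko.py | _find_canonical_token
-- ===== SOURCE A (Python) =====
-- def _find_canonical_token(coins: list[dict], symbol: str) -> dict | None:
--     """
--     Find the canonical/official token from a list of coins with potentially matching symbols.
--
--     Args:
--         coins: List of coin dictionaries from CoinGecko API
--         symbol: Token symbol to match (e.g. 'btc', 'eth')
--
--     Returns:
--         The best matching coin dictionary or None if no matches found
--     """
--     # Find all coins matching the symbol
--     matching_coins = [
--         coin for coin in coins
--         if coin['symbol'].lower() == symbol.lower()
--     ]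
--
--     if not matching_coins:
--         return None
--
--     if len(matching_coins) == 1:
--         return matching_coins[0]
--
--     # Multiple matches - score each token based on characteristics of official tokens
--     def score_token(coin: dict) -> tuple[int, int, int]:
--         # 1. ID complexity score (fewer special chars = higher score)
--         special_chars = sum(1 for c in coin['id'] if not c.isalnum())
--         id_score = 100 - special_chars - len(coin['id'])
--
--         # 2. Name match score (name matching symbol = higher score)
--         # e.g. for BTC, prefer "Bitcoin" over "Bitcoin Wrapped"
--         name_words = coin['name'].lower().split()
--         symbol_in_name = symbol.lower() in name_words
--         name_score = 100 if symbol_in_name else 50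
--         name_score -= len(name_words)  # Prefer shorter names
--
--         # 3. ID match score (id matching symbol = higher score)
--         # e.g. for BTC, prefer "bitcoin" over "wrapped-bitcoin"
--         id_words = coin['id'].lower().split('-')
--         symbol_in_id = symbol.lower() in id_words
--         id_match_score = 100 if symbol_in_id else 50
--         id_match_score -= len(id_words)  # Prefer shorter IDs
--
--         return (id_match_score, name_score, id_score)
--
--     # Return the highest scoring coin
--     return max(matching_coins, key=score_token)
-- ===== SOURCE B (Python) =====
-- def _find_canonical_token(coins: list[dict], symbol: str) -> dict | None:
--     """Radix-style selection: filter by symbol, then successively narrow the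
--     candidates to the coins maximal in each score component (id-match, name
--     match, id simplicity) in priority order, returning the first survivor.
--     No score tuples are built or compared."""
--     sym = symbol.lower()
--     matching = [coin for coin in coins if coin['symbol'].lower() == sym]
--
--     if not matching:
--         return None
--     if len(matching) == 1:
--         return matching[0]
--
--     def id_match_score(coin):
--         words = coin['id'].lower().split('-')
--         return (100 if sym in words else 50) - len(words)
--
--     def name_score(coin):
--         words = coin['name'].lower().split()
--         return (100 if sym in words else 50) - len(words)
--
--     def id_score(coin):
--         cid = coin['id']
--         return 100 - sum(1 for ch in cid if not ch.isalnum()) - len(cid)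
--
--     for score in (id_match_score, name_score, id_score):
--         best = max(map(score, matching))
--         matching = [coin for coin in matching if score(coin) == best]
--         if len(matching) == 1:
--             break
--
--     return matching[0]
-- ===== Notes on version B (the rewrite author's own statement) =====
-- stated objective: alternative
-- what changed: Replaces the lexicographic score-tuple max() scan with radix-style successive refinement: for each score component in priority order it keeps only the coins maximal in that component (early exit on a unique survivor) and returns the first survivor; no score tuples are ever built or compared.
import Mathlib
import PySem

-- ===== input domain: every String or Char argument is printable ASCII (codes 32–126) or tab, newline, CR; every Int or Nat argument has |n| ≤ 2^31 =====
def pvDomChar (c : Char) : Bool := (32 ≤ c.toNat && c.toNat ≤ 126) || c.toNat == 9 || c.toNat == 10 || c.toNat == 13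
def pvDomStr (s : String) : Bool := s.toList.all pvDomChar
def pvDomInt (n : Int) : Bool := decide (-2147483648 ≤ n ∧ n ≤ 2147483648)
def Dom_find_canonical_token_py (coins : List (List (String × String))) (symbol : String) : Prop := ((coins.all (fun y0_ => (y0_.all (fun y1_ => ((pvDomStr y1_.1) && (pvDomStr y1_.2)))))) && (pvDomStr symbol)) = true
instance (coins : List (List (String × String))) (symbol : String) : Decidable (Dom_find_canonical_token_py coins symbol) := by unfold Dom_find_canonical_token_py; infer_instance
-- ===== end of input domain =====

-- B selects the best matching coin by radix-style successive refinement (keep the maximizers of each score component in priority order) instead of A's single lexicographic-tuple max() scan (alternative algorithm, same cost class).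


-- first-match lookup with a default: exact for coin['k'] under Pre_ (key present, unique keys)
def pvLook (coin : List (String × String)) (k : String) : String :=
  ((coin.find? (fun p => p.1 == k)).map (fun p => p.2)).getD ""

-- coin['symbol'].lower() == symbol.lower()  (the filter line both Pythons start with)
def pvMatches (symbol : String) (coin : List (String × String)) : Bool :=
  PySem.Str.lower (pvLook coin "symbol") == PySem.Str.lower symbol

-- ===== PORT A =====
-- Python's lexicographic '>' on int triples
def pvLexGt (a b : Int × Int × Int) : Bool :=
  decide (b.1 < a.1 ∨ (a.1 = b.1 ∧ (b.2.1 < a.2.1 ∨ (a.2.1 = b.2.1 ∧ b.2.2 < a.2.2))))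

-- A's score_token
def pvScore (symbol : String) (coin : List (String × String)) : Int × Int × Int :=
  let idStr := pvLook coin "id"
  let special : Int := (idStr.toList.countP (fun c => !(PySem.Chars.isalnum c)) : Int)
  let idScore : Int := 100 - special - PySem.Str.len idStr
  let nameWords := PySem.Str.split₀ (PySem.Str.lower (pvLook coin "name"))
  let nameScore : Int := (if nameWords.contains (PySem.Str.lower symbol) then 100 else 50) - (nameWords.length : Int)
  let idWords := (PySem.Str.split? (PySem.Str.lower idStr) "-").getD []   -- sep = "-" ≠ "", never none
  let idMatchScore : Int := (if idWords.contains (PySem.Str.lower symbol) then 100 else 50) - (idWords.length : Int)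
  (idMatchScore, nameScore, idScore)

def find_canonical_token_py (coins : List (List (String × String))) (symbol : String) : Option (List (String × String)) :=
  match coins.filter (fun coin => pvMatches symbol coin) with
  | [] => none
  | [c] => some c
  | x :: t =>
      -- max(matching_coins, key=score_token): first-wins linear scan
      some (t.foldl (fun best coin =>
        if pvLexGt (pvScore symbol coin) (pvScore symbol best) then coin else best) x)

-- ===== PORT B =====
-- B's three score components (their 'sym' parameter is the precomputed symbol.lower())
def pvIdMatchScore (sym : String) (coin : List (String × String)) : Int :=
  let words := (PySem.Str.split? (PySem.Str.lower (pvLook coin "id")) "-").getD []   -- sep ≠ "", never none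
  (if words.contains sym then 100 else 50) - (words.length : Int)

def pvNameScore (sym : String) (coin : List (String × String)) : Int :=
  let words := PySem.Str.split₀ (PySem.Str.lower (pvLook coin "name"))
  (if words.contains sym then 100 else 50) - (words.length : Int)

def pvIdScore (coin : List (String × String)) : Int :=
  let cid := pvLook coin "id"
  100 - (cid.toList.countP (fun c => !(PySem.Chars.isalnum c)) : Int) - PySem.Str.len cid

-- max(...) on a nonempty list of ints (B only applies it to nonempty lists; [] is unreachable)
def pvMaxInt : List Int → Int
  | [] => 0
  | x :: t => t.foldl max x

-- B's for-loop over the score components ('best'/'matching' written inline), with its early break on a unique survivor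
def pvRefine (fs : List (List (String × String) → Int)) (m : List (List (String × String))) :
    List (List (String × String)) :=
  match fs with
  | [] => m
  | f :: rest =>
      if (m.filter (fun c => f c == pvMaxInt (m.map f))).length == 1 then
        m.filter (fun c => f c == pvMaxInt (m.map f))
      else pvRefine rest (m.filter (fun c => f c == pvMaxInt (m.map f)))

def find_canonical_token_py_alt (coins : List (List (String × String))) (symbol : String) : Option (List (String × String)) :=
  if (coins.filter (fun coin => pvMatches symbol coin)).isEmpty then none
  else if (coins.filter (fun coin => pvMatches symbol coin)).length == 1 then
    (coins.filter (fun coin => pvMatches symbol coin)).head?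
  else
    (pvRefine [pvIdMatchScore (PySem.Str.lower symbol), pvNameScore (PySem.Str.lower symbol), pvIdScore]
      (coins.filter (fun coin => pvMatches symbol coin))).head?

-- ===== PRECONDITION & SPEC =====
-- Pre_ excludes coin dicts encoded with duplicate keys (an ambiguous association-list encoding of a Python
-- dict) and exactly the inputs where Python A raises KeyError: a coin without the 'symbol' key, or — when at
-- least two coins match the symbol, so scoring runs — a matching coin without 'id' or 'name'.
def Pre_find_canonical_token_py (coins : List (List (String × String))) (symbol : String) : Prop :=
  ∀ coin ∈ coins, (coin.map Prod.fst).Nodup ∧ "symbol" ∈ coin.map Prod.fst ∧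
    (2 ≤ (coins.filter (fun c => pvMatches symbol c)).length → pvMatches symbol coin = true →
      "id" ∈ coin.map Prod.fst ∧ "name" ∈ coin.map Prod.fst)
instance (coins : List (List (String × String))) (symbol : String) : Decidable (Pre_find_canonical_token_py coins symbol) := by unfold Pre_find_canonical_token_py; infer_instance

def pvWitness_find_canonical_token_py : (List (List (String × String))) × String :=
  ([[("symbol", "BTC"), ("id", "bitcoin"), ("name", "Bitcoin")],
    [("symbol", "btc"), ("id", "wrapped-bitcoin"), ("name", "Wrapped Bitcoin")]], "btc")

def Spec_find_canonical_token_py (coins : List (List (String × String))) (symbol : String) (out : Option (List (String × String))) : Prop := out = find_canonical_token_py_alt coins symbol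
instance (coins : List (List (String × String))) (symbol : String) (out : Option (List (String × String))) : Decidable (Spec_find_canonical_token_py coins symbol out) := by unfold Spec_find_canonical_token_py; infer_instance

-- ===== CLAIM (what is proved, stated in full; the proofs are below) =====
def Claim_equal_find_canonical_token_py : Prop := ∀ (coins : List (List (String × String))) (symbol : String), Dom_find_canonical_token_py coins symbol → Pre_find_canonical_token_py coins symbol → Spec_find_canonical_token_py coins symbol (find_canonical_token_py coins symbol)

-- ===== LEMMAS AND PROOFS =====

-- A's first-wins argmax loop, abstracted over the strict comparison
def pvAF {α : Type} (gt : α → α → Bool) (x : α) (t : List α) : α :=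
  t.foldl (fun b c => if gt c b then c else b) x

-- lift an Int key over a tie-breaking strict comparison (one lexicographic step)
def pvLift {α : Type} (f : α → Int) (g : α → α → Bool) (c b : α) : Bool :=
  decide (f b < f c) || ((f c == f b) && g c b)

-- the lexicographic comparison induced by a priority list of keys
def pvChain {α : Type} : List (α → Int) → α → α → Bool
  | [] => fun _ _ => false
  | f :: rest => pvLift f (pvChain rest)

lemma pvAF_false {α : Type} (x : α) (t : List α) : pvAF (fun _ _ => false) x t = x := by
  induction t generalizing x with
  | nil => rfl
  | cons c t ih => simp [pvAF]

lemma pvLift_sel {α : Type} (f : α → Int) (g : α → α → Bool) (c x : α) :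
    f (if pvLift f g c x then c else x) = max (f x) (f c) := by
  by_cases h : pvLift f g c x = true
  · have hx : f x ≤ f c := by
      unfold pvLift at h
      simp only [Bool.or_eq_true, Bool.and_eq_true, decide_eq_true_eq, beq_iff_eq] at h
      rcases h with h | ⟨h, -⟩ <;> omega
    simp [if_pos h, max_eq_right hx]
  · have hc : f c ≤ f x := by
      unfold pvLift at h
      simp only [Bool.or_eq_true, Bool.and_eq_true, decide_eq_true_eq, beq_iff_eq] at h
      have := fun hh => h (Or.inl hh)
      omega
    simp [if_neg h, max_eq_left hc]

-- one refinement stage: restricting to the maximizers of the first key preserves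
-- the first-wins argmax, which then runs under the remaining comparison
lemma pvStage {α : Type} (f : α → Int) (g : α → α → Bool) :
    ∀ (t : List α) (x : α), ∃ y u,
      (x :: t).filter (fun c => f c == (t.map f).foldl max (f x)) = y :: u ∧
        pvAF (pvLift f g) x t = pvAF g y u := by
  intro t
  induction t with
  | nil =>
      intro x
      exact ⟨x, [], by simp, rfl⟩
  | cons c t ih =>
      intro x
      obtain ⟨y, u, hfil, hAF⟩ := ih (if pvLift f g c x then c else x)
      have hmax : f (if pvLift f g c x then c else x) = max (f x) (f c) := pvLift_sel f g c x
      have hK0 : ((c :: t).map f).foldl max (f x) =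
          (t.map f).foldl max (f (if pvLift f g c x then c else x)) := by
        rw [List.map_cons, List.foldl_cons, ← hmax]
      have hAFstep : pvAF (pvLift f g) x (c :: t) =
          pvAF (pvLift f g) (if pvLift f g c x then c else x) t := rfl
      rw [hK0, hAFstep]
      set K := (t.map f).foldl max (f (if pvLift f g c x then c else x)) with hKdef
      have hXK : f (if pvLift f g c x then c else x) ≤ K := by
        rw [hKdef]
        exact (PySem.List.le_foldl_max (t.map f) _).1
      have hXor : f (if pvLift f g c x then c else x) = f x ∨
          f (if pvLift f g c x then c else x) = f c := by
        rw [hmax]; exact max_choice _ _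
      have hxle : f x ≤ f (if pvLift f g c x then c else x) := by
        rw [hmax]; exact le_max_left _ _
      have hcle : f c ≤ f (if pvLift f g c x then c else x) := by
        rw [hmax]; exact le_max_right _ _
      by_cases hx : f x = K <;> by_cases hc : f c = K
      · -- both heads are maximal: the filter keeps x and c; pvAF's first tie-break step matches
        have hcx : f c = f x := by omega
        have hg : pvLift f g c x = g c x := by
          simp [pvLift, hcx]
        have hXeq : f (if pvLift f g c x then c else x) = K := by omega
        rw [List.filter_cons_of_pos (by simp [hXeq])] at hfil
        obtain ⟨hy, hu⟩ := List.cons.inj hfil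
        refine ⟨x, c :: u, ?_, ?_⟩
        · rw [List.filter_cons_of_pos (by simp [hx]), List.filter_cons_of_pos (by simp [hc]), hu]
        · rw [hAF, ← hy, hg]
          by_cases hgx : g c x = true <;> simp [pvAF, hgx]
      · -- x maximal, c not: c is dropped and the running best stays x
        have hlt : pvLift f g c x = false := by
          simp [pvLift, show ¬ f x < f c by omega, show f c ≠ f x by omega]
        have hXx : (if pvLift f g c x then c else x) = x := by simp [hlt]
        rw [hXx] at hfil hAF
        rw [List.filter_cons_of_pos (by simp [hx])] at hfil
        refine ⟨y, u, ?_, by rw [hXx]; exact hAF⟩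
        rw [List.filter_cons_of_pos (by simp [hx]), List.filter_cons_of_neg (by simp [hc])]
        exact hfil
      · -- c strictly greater than x: x is dropped and c becomes the running best
        have hlt : pvLift f g c x = true := by
          simp [pvLift, show f x < f c by omega]
        have hXc : (if pvLift f g c x then c else x) = c := by simp [hlt]
        rw [hXc] at hfil hAF
        rw [List.filter_cons_of_pos (by simp [hc])] at hfil
        refine ⟨y, u, ?_, by rw [hXc]; exact hAF⟩
        rw [List.filter_cons_of_neg (by simp [hx]), List.filter_cons_of_pos (by simp [hc])]
        exact hfil
      · -- neither head is maximal: both are dropped (the maximum sits deeper in the list)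
        have hXne : f (if pvLift f g c x then c else x) ≠ K := by omega
        rw [List.filter_cons_of_neg (by simp [hXne])] at hfil
        refine ⟨y, u, ?_, hAF⟩
        rw [List.filter_cons_of_neg (by simp [hx]), List.filter_cons_of_neg (by simp [hc])]
        exact hfil

-- the whole refinement loop: its first survivor is the first-wins argmax under the chained comparison
lemma pvRefine_head :
    ∀ (fs : List (List (String × String) → Int)) (x : List (String × String)) (t : List (List (String × String))),
      (pvRefine fs (x :: t)).head? = some (pvAF (pvChain fs) x t) := by
  intro fs
  induction fs with
  | nil => intro x t; simp [pvRefine, pvChain, pvAF_false]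
  | cons f rest ih =>
      intro x t
      obtain ⟨y, u, hfil, hAF⟩ := pvStage f (pvChain rest) t x
      have hfil' : (x :: t).filter (fun c => f c == pvMaxInt ((x :: t).map f)) = y :: u := by
        simpa [pvMaxInt] using hfil
      have hchain : pvChain (f :: rest) = pvLift f (pvChain rest) := rfl
      simp only [pvRefine, hfil', hchain, hAF]
      by_cases hlen : ((y :: u).length == 1) = true
      · obtain rfl : u = [] := by
          cases u with
          | nil => rfl
          | cons _ _ => simp at hlen
        simp [pvAF]
      · rw [if_neg hlen]
        exact ih y u

-- the chained comparison over B's three keys is A's lexicographic '>' on score triples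
lemma pvChain_eq (symbol : String) (c b : List (String × String)) :
    pvChain [pvIdMatchScore (PySem.Str.lower symbol), pvNameScore (PySem.Str.lower symbol), pvIdScore] c b
      = pvLexGt (pvScore symbol c) (pvScore symbol b) := by
  have hs : ∀ d, pvScore symbol d =
      (pvIdMatchScore (PySem.Str.lower symbol) d, pvNameScore (PySem.Str.lower symbol) d, pvIdScore d) := by
    intro d; rfl
  rw [Bool.eq_iff_iff]
  simp [pvChain, pvLift, pvLexGt, hs]

-- ===== VERDICT (by name: the statement is the Claim_ definition above) =====
theorem find_canonical_token_py_spec : Claim_equal_find_canonical_token_py := by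
  intro coins symbol _ _
  unfold Spec_find_canonical_token_py find_canonical_token_py find_canonical_token_py_alt
  cases hm : coins.filter (fun coin => pvMatches symbol coin) with
  | nil => rfl
  | cons x t =>
      cases t with
      | nil => rfl
      | cons c t' =>
          rw [if_neg (by simp), if_neg (by simp), pvRefine_head]
          refine congrArg some ?_
          have hfun : (fun (b cn : List (String × String)) =>
              if pvChain [pvIdMatchScore (PySem.Str.lower symbol), pvNameScore (PySem.Str.lower symbol), pvIdScore] cn b
              then cn else b) =
              (fun best coin => if pvLexGt (pvScore symbol coin) (pvScore symbol best) then coin else best) := by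
            funext bb cn
            rw [pvChain_eq]
          unfold pvAF
          rw [hfun]
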